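-- pv_equiv track=rewrite | github.com/sampdubs/project-euler-solutions | 58.py | smart_get_diags
-- ===== SOURCE A (Python) =====
-- def smart_get_diags(sidelen):
--     # to generate the diagonals, simply start at 1, then add 2 4 times, then add 4 4 times, then 6, etc.
--     assert sidelen % 2 == 1, "sidelen must be odd"
--     maxadd = sidelen - 1
--     diags = [1]
--     adding = 2
--     while adding <= maxadd:
--         for _ in range(4):
--             diags.append(diags[-1] + adding)
--         adding += 2
--     return diags
-- ===== SOURCE B (Python) =====
-- def smart_get_diags(sidelen):
--     # closed form: each ring k has corners n*n-6k, n*n-4k, n*n-2k, n*n with n = 2k+1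
--     assert sidelen % 2 == 1, "sidelen must be odd"
--     diags = [1]
--     for k in range(1, (sidelen - 1) // 2 + 1):
--         n = 2 * k + 1
--         diags.extend([n * n - 6 * k, n * n - 4 * k, n * n - 2 * k, n * n])
--     return diags
-- ===== Notes on version B (the rewrite author's own statement) =====
-- stated objective: alternative
-- what changed: B computes each ring's four diagonal corners by the closed form (2k+1)^2-6k..(2k+1)^2 from the ring index, instead of A's running accumulation of diags[-1]+adding in a nested while/for loop.
import Mathlib
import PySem

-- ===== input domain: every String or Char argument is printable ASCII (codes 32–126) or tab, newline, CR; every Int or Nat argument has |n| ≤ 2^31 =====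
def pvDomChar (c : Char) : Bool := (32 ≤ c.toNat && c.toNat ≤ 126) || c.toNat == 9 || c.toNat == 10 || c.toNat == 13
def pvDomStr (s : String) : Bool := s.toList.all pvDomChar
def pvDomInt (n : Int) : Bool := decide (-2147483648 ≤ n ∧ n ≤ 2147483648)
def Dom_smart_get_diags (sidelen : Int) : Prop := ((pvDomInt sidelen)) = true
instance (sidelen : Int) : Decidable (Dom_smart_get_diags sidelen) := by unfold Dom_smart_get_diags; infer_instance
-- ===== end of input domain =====

-- B replaces A's running accumulation (diags[-1] + adding, nested while/for) by the closed-form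
-- corners (2k+1)^2-6k, -4k, -2k, -0 of each ring k; objective: alternative (same cost, no loop-carried state).

-- ===== PORT A =====
-- inner 'for _ in range(4): diags.append(diags[-1] + adding)' (diags is never empty, so the 0 default of pyGetD is never used)
def pvAInner : Nat → Int → List Int → List Int
  | 0, _, diags => diags
  | n + 1, adding, diags => pvAInner n adding (diags ++ [PySem.List.pyGetD diags (-1) 0 + adding])

-- 'while adding <= maxadd: <inner>; adding += 2'
def pvALoop (adding maxadd : Int) (diags : List Int) : List Int :=
  if adding ≤ maxadd then pvALoop (adding + 2) maxadd (pvAInner 4 adding diags) else diags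
termination_by (maxadd + 2 - adding).toNat
decreasing_by omega

def smart_get_diags (sidelen : Int) : List Int :=
  pvALoop 2 (sidelen - 1) [1]

-- ===== PORT B =====
-- the list Source B extends by for ring k (n = 2*k+1)
def pvBlock (k : Int) : List Int :=
  [(2*k+1)*(2*k+1) - 6*k, (2*k+1)*(2*k+1) - 4*k, (2*k+1)*(2*k+1) - 2*k, (2*k+1)*(2*k+1)]

def smart_get_diags_alt (sidelen : Int) : List Int :=
  (PySem.List.pyRange 1 (PySem.Int.floordiv (sidelen - 1) 2 + 1) 1).foldl
    (fun diags k => diags ++ pvBlock k) [1]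

-- ===== PRECONDITION & SPEC =====
-- A's assert raises AssertionError unless sidelen % 2 == 1; exactly those inputs are excluded.
def Pre_smart_get_diags (sidelen : Int) : Prop := PySem.Int.mod sidelen 2 = 1
instance (sidelen : Int) : Decidable (Pre_smart_get_diags sidelen) := by unfold Pre_smart_get_diags; infer_instance
def pvWitness_smart_get_diags : Int := 5

def Spec_smart_get_diags (sidelen : Int) (out : List Int) : Prop := out = smart_get_diags_alt sidelen
instance (sidelen : Int) (out : List Int) : Decidable (Spec_smart_get_diags sidelen out) := by unfold Spec_smart_get_diags; infer_instance

-- ===== CLAIM (what is proved, stated in full; the proofs are below) =====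
def Claim_equal_smart_get_diags : Prop := ∀ (sidelen : Int), Dom_smart_get_diags sidelen → Pre_smart_get_diags sidelen → Spec_smart_get_diags sidelen (smart_get_diags sidelen)

-- ===== LEMMAS AND PROOFS =====

-- the common spine: start [1], then one block per ring
def pvSpine : Nat → List Int
  | 0 => [1]
  | k + 1 => pvSpine k ++ pvBlock (k + 1)

lemma pvSpine_last (k : Nat) :
    PySem.List.pyGetD (pvSpine k) (-1) 0 = (2*(k:Int)+1) * (2*(k:Int)+1) := by
  cases k with
  | zero => simp [pvSpine, PySem.List.pyGetD_neg_one ([1] : List Int) 0 (by simp)]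
  | succ j =>
    show PySem.List.pyGetD (pvSpine j ++ pvBlock (j+1)) (-1) 0 = _
    have : pvSpine j ++ pvBlock (j+1)
        = (pvSpine j ++ [(2*((j:Int)+1)+1)*(2*((j:Int)+1)+1) - 6*((j:Int)+1),
            (2*((j:Int)+1)+1)*(2*((j:Int)+1)+1) - 4*((j:Int)+1),
            (2*((j:Int)+1)+1)*(2*((j:Int)+1)+1) - 2*((j:Int)+1)])
          ++ [(2*((j:Int)+1)+1)*(2*((j:Int)+1)+1)] := by
      simp [pvBlock]
    rw [this, PySem.List.pyGetD_neg_one_append_singleton]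
    push_cast; ring

lemma pvAInner_step (j : Nat) :
    pvAInner 4 (2*(j:Int)+2) (pvSpine j) = pvSpine (j+1) := by
  have h := pvSpine_last j
  set L := pvSpine j with hL
  set N := (2*(j:Int)+1) * (2*(j:Int)+1) with hN
  set a := 2*(j:Int)+2 with ha
  have s1 : pvAInner 4 a L = pvAInner 3 a (L ++ [N + a]) := by
    simp only [pvAInner]; rw [h]
  have s2 : pvAInner 3 a (L ++ [N + a]) = pvAInner 2 a (L ++ [N + a] ++ [N + a + a]) := by
    simp only [pvAInner, PySem.List.pyGetD_neg_one_append_singleton]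
  have s3 : pvAInner 2 a (L ++ [N + a] ++ [N + a + a])
      = pvAInner 1 a (L ++ [N + a] ++ [N + a + a] ++ [N + a + a + a]) := by
    simp only [pvAInner, PySem.List.pyGetD_neg_one_append_singleton]
  have s4 : pvAInner 1 a (L ++ [N + a] ++ [N + a + a] ++ [N + a + a + a])
      = L ++ [N + a] ++ [N + a + a] ++ [N + a + a + a] ++ [N + a + a + a + a] := by
    simp only [pvAInner, PySem.List.pyGetD_neg_one_append_singleton]
  show pvAInner 4 a L = L ++ pvBlock ((j:Nat)+1)
  rw [s1, s2, s3, s4]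
  have hb : pvBlock ((j:Nat)+1) = [N + a, N + a + a, N + a + a + a, N + a + a + a + a] := by
    simp only [pvBlock, hN, ha, List.cons.injEq, and_true]
    -- cast already aligned
    refine ⟨by ring, by ring, by ring, by ring⟩
  rw [hb]
  simp [List.append_assoc]

lemma pvALoop_spine (m : Nat) : ∀ (j : Nat),
    pvALoop (2*(j:Int)+2) (2*((j:Int)+(m:Int))) (pvSpine j) = pvSpine (j+m) := by
  induction m with
  | zero =>
    intro j
    rw [pvALoop, if_neg (by omega)]
    simp
  | succ m ih =>
    intro j
    rw [pvALoop, if_pos (by push_cast; omega), pvAInner_step j]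
    have h2 := ih (j+1)
    rw [show j + (m+1) = j + 1 + m by omega]
    push_cast at h2 ⊢
    convert h2 using 2
    all_goals ring

lemma pvFoldl_spine (K : Nat) :
    (PySem.List.pyRange 1 ((K:Int)+1) 1).foldl (fun diags k => diags ++ pvBlock k) [1]
      = pvSpine K := by
  induction K with
  | zero => simp [PySem.List.pyRange_one_eq_nil, pvSpine]
  | succ j ih =>
    rw [show ((j+1:Nat):Int)+1 = ((j:Int)+1)+1 by push_cast; ring,
      PySem.List.pyRange_one_succ_right, List.foldl_append, ih]
    · simp [pvSpine]
    · omega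

-- ===== VERDICT (by name: the statement is the Claim_ definition above) =====
theorem smart_get_diags_spec : Claim_equal_smart_get_diags := by
  intro sidelen _ hpre
  unfold Pre_smart_get_diags at hpre
  rw [PySem.Int.mod_eq_emod_of_pos (by norm_num)] at hpre
  unfold Spec_smart_get_diags smart_get_diags smart_get_diags_alt
  rw [PySem.Int.floordiv_eq_ediv_of_pos (by norm_num)]
  by_cases hneg : sidelen < 0
  · -- negative odd sidelen: both loops are empty, both return [1]
    rw [pvALoop, if_neg (by omega)]
    rw [PySem.List.pyRange_one_eq_nil (by omega)]
    rfl
  · -- sidelen odd, 0 ≤ sidelen: sidelen - 1 = 2*K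
    obtain ⟨K, hK⟩ : ∃ K : Nat, sidelen - 1 = 2*(K:Int) := by
      refine ⟨((sidelen-1)/2).toNat, ?_⟩; omega
    rw [hK, show (2*(K:Int))/2 = (K:Int) by omega, pvFoldl_spine K]
    have := pvALoop_spine K 0
    simpa using this
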